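-- pv_equiv track=rewrite | github.com/ema-moisei/lab_2_part_2 | 9.stadium.py | inadequate_seat
-- ===== SOURCE A (Python) =====
-- def inadequate_seat(seats):
--     seat_position = []
--     col_and_poz = []
--     for col in range(0, len(seats[0])):
--         current_col = []
--         matr_poz = []
--         for line in range(len(seats)-1, -1, -1):
--             current_col.append(seats[line][col])
--             matr_poz.append([line, col])
--         col_and_poz.append((current_col, matr_poz))
--     for pair in col_and_poz:
--         heights = pair[0]
--         poz = pair[1]
--         for index1, first_pers in enumerate(heights):
--             for index2, second_pers in enumerate(heights[index1+1:]):
--                 if first_pers <= second_pers: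
--                     if tuple(poz[index1]) not in seat_position:
--                         seat_position.append(tuple(poz[index1]))
--     return seat_position
-- ===== SOURCE B (Python) =====
-- def inadequate_seat(seats):
--     res = []
--     for col in range(len(seats[0])):
--         marked = []
--         best = None
--         for line, row in enumerate(seats):
--             h = row[col]
--             if best is not None and best >= h:
--                 marked.append((line, col))
--             if best is None or h > best:
--                 best = h
--         res.extend(reversed(marked))
--     return res
-- ===== Notes on version B (the rewrite author's own statement) =====
-- stated objective: faster
-- what changed: Replaces A's per-column all-pairs comparison (plus a membership-checked append into the global result) by a single running-maximum pass per column: a seat is marked iff the prefix maximum of the rows above it is >= its height, collected per column and reversed to reproduce A's bottom-to-top order.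
import Mathlib
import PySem

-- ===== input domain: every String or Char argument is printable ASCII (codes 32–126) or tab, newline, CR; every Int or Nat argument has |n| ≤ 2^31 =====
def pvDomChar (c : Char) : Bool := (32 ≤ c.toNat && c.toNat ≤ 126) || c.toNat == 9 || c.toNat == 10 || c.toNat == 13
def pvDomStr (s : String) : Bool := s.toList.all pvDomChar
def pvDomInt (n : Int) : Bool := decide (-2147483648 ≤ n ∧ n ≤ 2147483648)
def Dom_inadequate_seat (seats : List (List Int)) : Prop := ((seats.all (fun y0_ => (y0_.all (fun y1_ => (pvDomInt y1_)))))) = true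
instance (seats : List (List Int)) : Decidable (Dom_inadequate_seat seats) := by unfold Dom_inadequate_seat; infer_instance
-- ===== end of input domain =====

-- B replaces A's quadratic per-column all-pairs scan by a linear running-maximum pass per column (objective: faster, asymptotic).


-- ===== PORT A =====
def inadequate_seat (seats : List (List Int)) : List (Int × Int) :=
  let colAndPoz : List (List Int × List (Int × Int)) :=
    (PySem.List.pyRange 0 ((PySem.List.pyGetD seats 0 []).length : Int) 1).foldl
      (fun cap col =>
        let pr := (PySem.List.pyRange ((seats.length : Int) - 1) (-1) (-1)).foldl
          (fun (st : List Int × List (Int × Int)) line =>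
            (st.1 ++ [PySem.List.pyGetD (PySem.List.pyGetD seats line []) col 0],
             st.2 ++ [(line, col)]))
          ([], [])
        cap ++ [pr]) []
  colAndPoz.foldl
    (fun sp pair =>
      (PySem.List.enumerate pair.1 0).foldl
        (fun sp ih =>
          (PySem.List.enumerate (PySem.List.slice pair.1 (some (ih.1 + 1)) none) 0).foldl
            (fun sp jh =>
              if ih.2 ≤ jh.2 then
                if PySem.List.pyGetD pair.2 ih.1 (0, 0) ∈ sp then sp
                else sp ++ [PySem.List.pyGetD pair.2 ih.1 (0, 0)]
              else sp)
            sp)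
        sp)
    []

-- ===== PORT B =====
def inadequate_seat_alt (seats : List (List Int)) : List (Int × Int) :=
  (PySem.List.pyRange 0 ((PySem.List.pyGetD seats 0 []).length : Int) 1).foldl
    (fun res col =>
      let st := (PySem.List.enumerate seats 0).foldl
        (fun (st : List (Int × Int) × Option Int) lr =>
          ((match st.2 with
            | some b => if b ≥ PySem.List.pyGetD lr.2 col 0 then st.1 ++ [(lr.1, col)] else st.1
            | none => st.1),
           (match st.2 with
            | some b => if PySem.List.pyGetD lr.2 col 0 > b then some (PySem.List.pyGetD lr.2 col 0) else some b
            | none => some (PySem.List.pyGetD lr.2 col 0))))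
        ([], none)
      res ++ st.1.reverse)
    []

-- ===== PRECONDITION & SPEC =====
-- Pre_ excludes exactly the inputs where the Python A raises an IndexError: an empty seating plan,
-- and ragged inputs where some row is shorter than row 0.
def Pre_inadequate_seat (seats : List (List Int)) : Prop :=
  seats ≠ [] ∧ ∀ row ∈ seats, (seats.headD []).length ≤ row.length
instance (seats : List (List Int)) : Decidable (Pre_inadequate_seat seats) := by
  unfold Pre_inadequate_seat; infer_instance
def pvWitness_inadequate_seat : List (List Int) := [[1, 2], [3, 1], [2, 2]]
def Spec_inadequate_seat (seats : List (List Int)) (out : List (Int × Int)) : Prop := out = inadequate_seat_alt seats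
instance (seats : List (List Int)) (out : List (Int × Int)) : Decidable (Spec_inadequate_seat seats out) := by unfold Spec_inadequate_seat; infer_instance

-- ===== CLAIM (what is proved, stated in full; the proofs are below) =====
def Claim_equal_inadequate_seat : Prop := ∀ (seats : List (List Int)), Dom_inadequate_seat seats → Pre_inadequate_seat seats → Spec_inadequate_seat seats (inadequate_seat seats)

-- ===== LEMMAS AND PROOFS =====

-- per-column values, top row first
def pvVcol (seats : List (List Int)) (col : Int) : List Int :=
  seats.map (fun row => PySem.List.pyGetD row col 0)

def pvBmarks (pre vs : List Int) (col : Int) : List (Int × Int) :=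
  ((List.range vs.length).filter
      (fun j => (pre ++ vs.take j).any (fun y => vs.getD j 0 ≤ y))).map
    (fun j => (((pre.length + j : Nat) : Int), col))

def pvBest (pre : List Int) : Option Int :=
  pre.foldl (fun b h => match b with
      | some b => if h > b then some h else some b
      | none => some h) none

lemma pv_best_some (ps : List Int) (b : Int) :
    ps.foldl (fun b h => match b with
      | some b => if h > b then some h else some b
      | none => some h) (some b) = some (ps.foldl max b) := by
  induction ps generalizing b with
  | nil => simp
  | cons q qs ih =>
    simp only [List.foldl_cons]
    rcases le_or_gt q b with h | h
    · rw [if_neg (by omega), ih, max_eq_left h]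
    · rw [if_pos h, ih, max_eq_right h.le]

lemma pv_best_cons (p : Int) (ps : List Int) : pvBest (p :: ps) = some (ps.foldl max p) := by
  simp [pvBest, pv_best_some]

lemma pv_fact1 {α : Type} (pre : List Int) (v : Int) (acc : List α) (e : α) :
    (match pvBest pre with
      | some b => if b ≥ v then acc ++ [e] else acc
      | none => acc)
    = if pre.any (fun y => v ≤ y) then acc ++ [e] else acc := by
  cases pre with
  | nil => simp [pvBest]
  | cons p ps =>
    rw [pv_best_cons]
    have hle := PySem.List.le_foldl_max ps p
    have hmem := PySem.List.foldl_max_mem ps p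
    by_cases h : v ≤ ps.foldl max p
    · simp only [ge_iff_le, h, if_true]
      rw [if_pos]
      rw [List.any_eq_true]
      rcases hmem with hm | hm
      · exact ⟨p, List.mem_cons_self, by rw [hm] at h; simpa using h⟩
      · exact ⟨ps.foldl max p, List.mem_cons_of_mem _ hm, by simpa using h⟩
    · simp only [ge_iff_le, h, if_false]
      rw [if_neg]
      rw [List.any_eq_true]
      rintro ⟨y, hy, hvy⟩
      simp only [decide_eq_true_eq] at hvy
      rcases List.mem_cons.1 hy with rfl | hy
      · exact h (le_trans hvy hle.1)
      · exact h (le_trans hvy (hle.2 y hy))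

lemma pv_fact2 (pre : List Int) (v : Int) :
    (match pvBest pre with
      | some b => if v > b then some v else some b
      | none => some v)
    = pvBest (pre ++ [v]) := by
  cases pre with
  | nil => simp [pvBest]
  | cons p ps =>
    simp only [List.cons_append, pv_best_cons, List.foldl_append, List.foldl_cons,
      List.foldl_nil]
    rcases le_or_gt v (ps.foldl max p) with h | h
    · rw [if_neg (by omega), max_eq_left h]
    · rw [if_pos h, max_eq_right h.le]

lemma pv_bmarks_cons (pre : List Int) (v : Int) (vs : List Int) (col : Int) :
    pvBmarks pre (v :: vs) col
    = (if pre.any (fun y => v ≤ y) then [((pre.length : Int), col)] else [])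
      ++ pvBmarks (pre ++ [v]) vs col := by
  simp only [pvBmarks, List.length_cons]
  rw [List.range_succ_eq_map, List.filter_cons]
  simp only [List.take_zero, List.append_nil, List.getD_cons_zero]
  have hcf : List.filter
        (fun j => (pre ++ List.take j (v :: vs)).any fun y => decide ((v :: vs).getD j 0 ≤ y))
        (List.map Nat.succ (List.range vs.length))
      = List.map Nat.succ
        (List.filter (fun j => (pre ++ [v] ++ List.take j vs).any fun y => decide (vs.getD j 0 ≤ y))
          (List.range vs.length)) := by
    rw [List.filter_map]
    congr 1
    apply List.filter_congr
    intro j hj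
    simp only [Function.comp_apply, Nat.succ_eq_add_one, List.take_succ_cons,
      List.getD_cons_succ]
    rw [List.append_cons]
  have hrest : List.map (fun j => (((pre.length + j : Nat) : Int), col))
      (List.filter
        (fun j => (pre ++ List.take j (v :: vs)).any fun y => decide ((v :: vs).getD j 0 ≤ y))
        (List.map Nat.succ (List.range vs.length)))
      = pvBmarks (pre ++ [v]) vs col := by
    rw [hcf, List.map_map, pvBmarks]
    apply List.map_congr_left
    intro j hj
    simp only [Function.comp_apply, Nat.succ_eq_add_one, List.length_append,
      List.length_cons, List.length_nil]
    have h2 : pre.length + (j + 1) = pre.length + 0 + 1 + j := by omega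
    rw [h2]
  by_cases h : pre.any (fun y => v ≤ y)
  · simp only [h, decide_true, if_true, List.map_cons]
    rw [hrest]
    simp only [Nat.add_zero, List.singleton_append]
    rw [pvBmarks]
  · simp only [h, decide_false, Bool.false_eq_true, if_false]
    rw [hrest]
    simp only [List.nil_append]
    rw [pvBmarks]

-- the common canonical value of both programs
def pvCanon (seats : List (List Int)) : List (Int × Int) :=
  (PySem.List.pyRange 0 ((PySem.List.pyGetD seats 0 []).length : Int) 1).flatMap
    (fun col => (pvBmarks [] (pvVcol seats col) col).reverse)

lemma pv_enum_map {α β : Type} (g : α → β) (xs : List α) (s : Int) :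
    PySem.List.enumerate (xs.map g) s = (PySem.List.enumerate xs s).map (fun p => (p.1, g p.2)) := by
  induction xs generalizing s with
  | nil => simp [PySem.List.enumerate_nil]
  | cons x xs ih => simp [PySem.List.enumerate_cons, ih]

lemma pv_enum_range (n : Nat) :
    PySem.List.enumerate (List.range n) 0 = (List.range n).map (fun (k : Nat) => ((k : Int), k)) := by
  induction n with
  | zero => simp [PySem.List.enumerate_nil]
  | succ n ih =>
    rw [List.range_succ, PySem.List.enumerate_append, ih]
    simp [PySem.List.enumerate_cons, PySem.List.enumerate_nil]

-- B's per-column fold, characterised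
lemma pv_bfold (col : Int) (vs pre : List Int) (acc : List (Int × Int)) :
    (PySem.List.enumerate vs (pre.length : Int)).foldl
      (fun (st : List (Int × Int) × Option Int) (p : Int × Int) =>
        ((match st.2 with
          | some b => if b ≥ p.2 then st.1 ++ [(p.1, col)] else st.1
          | none => st.1),
         (match st.2 with
          | some b => if p.2 > b then some p.2 else some b
          | none => some p.2)))
      (acc, pvBest pre)
    = (acc ++ pvBmarks pre vs col, pvBest (pre ++ vs)) := by
  induction vs generalizing pre acc with
  | nil => simp [PySem.List.enumerate_nil, pvBmarks]
  | cons v vs ih =>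
    rw [PySem.List.enumerate_cons, List.foldl_cons]
    dsimp only
    rw [pv_fact1 pre v acc ((pre.length : Int), col), pv_fact2 pre v]
    have hlen : (pre.length : Int) + 1 = (((pre ++ [v]).length : Nat) : Int) := by
      simp
    rw [hlen, ih (pre ++ [v])]
    rw [pv_bmarks_cons]
    by_cases h : pre.any (fun y => v ≤ y)
    · simp only [h, if_true]
      rw [Prod.mk.injEq]
      constructor <;> simp
    · simp only [h, Bool.false_eq_true, if_false]
      rw [Prod.mk.injEq]
      constructor <;> simp

-- the inner append-once loop of A: appends x once iff some later height dominates
lemma pv_inner {first : Int} {x : Int × Int} (tail : List Int) (s : Int) (sp : List (Int × Int)) :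
    (PySem.List.enumerate tail s).foldl
      (fun sp jh => if first ≤ jh.2 then (if x ∈ sp then sp else sp ++ [x]) else sp) sp
    = if tail.any (fun y => first ≤ y) ∧ x ∉ sp then sp ++ [x] else sp := by
  induction tail generalizing s sp with
  | nil => simp [PySem.List.enumerate_nil]
  | cons t ts ih =>
    rw [PySem.List.enumerate_cons, List.foldl_cons, ih]
    by_cases h1 : first ≤ t
    · by_cases h2 : x ∈ sp
      · simp [h1, h2]
      · simp [h1, h2]
    · simp [h1]

-- the generic "append if new" loop over markers with pairwise-distinct values
lemma pv_mark {ι α : Type} [BEq α] [LawfulBEq α] (l : List ι) (c : ι → Bool)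
    (x : ι → α) (S : List α) (hnd : (l.map x).Nodup) (hS : ∀ i ∈ l, x i ∉ S) :
    l.foldl (fun sp i => if c i ∧ x i ∉ sp then sp ++ [x i] else sp) S
    = S ++ (l.filter c).map x := by
  induction l generalizing S with
  | nil => simp
  | cons i l ih =>
    simp only [List.map_cons, List.nodup_cons] at hnd
    by_cases hc : c i
    · have hxS : x i ∉ S := hS i (List.mem_cons_self)
      rw [List.foldl_cons, if_pos ⟨hc, hxS⟩]
      rw [ih (S ++ [x i]) hnd.2]
      · simp [hc]
      · intro j hj
        simp only [List.mem_append, List.mem_singleton]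
        push Not
        refine ⟨hS j (List.mem_cons_of_mem _ hj), ?_⟩
        intro he
        exact hnd.1 (he ▸ List.mem_map_of_mem hj)
    · rw [List.foldl_cons, if_neg (by simp [hc])]
      rw [ih S hnd.2 (fun j hj => hS j (List.mem_cons_of_mem _ hj))]
      simp [hc]
lemma pv_alt_eq_canon (seats : List (List Int)) :
    inadequate_seat_alt seats = pvCanon seats := by
  rw [inadequate_seat_alt, pvCanon]
  rw [PySem.List.foldl_append_eq_flatMap
    (g := fun col => ((PySem.List.enumerate seats 0).foldl
        (fun (st : List (Int × Int) × Option Int) lr =>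
          ((match st.2 with
            | some b => if b ≥ PySem.List.pyGetD lr.2 col 0 then st.1 ++ [(lr.1, col)] else st.1
            | none => st.1),
           (match st.2 with
            | some b => if PySem.List.pyGetD lr.2 col 0 > b then some (PySem.List.pyGetD lr.2 col 0) else some b
            | none => some (PySem.List.pyGetD lr.2 col 0))))
        ([], none)).1.reverse)]
  rw [List.nil_append]
  congr 1
  funext col
  congr 1
  have hm : PySem.List.enumerate (pvVcol seats col) 0
      = (PySem.List.enumerate seats 0).map (fun p => (p.1, PySem.List.pyGetD p.2 col 0)) := by
    rw [pvVcol, pv_enum_map]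
  have h0 : (0 : Int) = ((([] : List Int).length : Nat) : Int) := by simp
  have hb := pv_bfold col (pvVcol seats col) [] []
  rw [← h0, hm, List.foldl_map] at hb
  simp only [List.nil_append] at hb
  rw [show pvBest [] = none from rfl] at hb
  rw [hb]
lemma pv_rev_range (n : Nat) : (List.range n).reverse = (List.range n).map (fun k => n - 1 - k) := by
  rw [List.range_eq_range', List.reverse_range', ← List.range_eq_range']
  simp

lemma pv_any_take_drop (vs : List Int) (k : Nat) (hk : k < vs.length) :
    (((List.range vs.length).map (fun k' => vs.getD (vs.length - 1 - k') 0)).drop (k + 1)).any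
        (fun y => vs.getD (vs.length - 1 - k) 0 ≤ y)
      = (vs.take (vs.length - 1 - k)).any (fun y => vs.getD (vs.length - 1 - k) 0 ≤ y) := by
  apply Bool.coe_iff_coe.mp
  rw [← List.map_drop, List.any_map, List.any_eq_true, List.any_eq_true]
  constructor
  · rintro ⟨j, hj, hle⟩
    rw [List.mem_drop_iff_getElem] at hj
    obtain ⟨i, hi, rfl⟩ := hj
    simp only [List.length_range] at hi
    rw [List.getElem_range] at hle
    simp only [Function.comp_apply] at hle
    refine ⟨vs[vs.length - 1 - (k + 1 + i)]'(by omega), ?_, ?_⟩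
    · rw [List.mem_take_iff_getElem]
      exact ⟨vs.length - 1 - (k + 1 + i), by simp; omega, rfl⟩
    · rw [List.getD_eq_getElem vs 0 (by omega), List.getD_eq_getElem vs 0 (by omega)] at hle
      rw [List.getD_eq_getElem vs 0 (by omega)]
      exact hle
  · rintro ⟨y, hy, hle⟩
    rw [List.mem_take_iff_getElem] at hy
    obtain ⟨i, hi, rfl⟩ := hy
    simp only [List.length_take, lt_min_iff] at hi
    refine ⟨vs.length - 1 - i, ?_, ?_⟩
    · rw [List.mem_drop_iff_getElem]
      refine ⟨vs.length - 1 - i - (k + 1), by simp; omega, ?_⟩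
      rw [List.getElem_range]
      omega
    · simp only [Function.comp_apply]
      have hidx : vs.length - 1 - (vs.length - 1 - i) = i := by omega
      rw [List.getD_eq_getElem vs 0 (by omega)] at hle
      have h1 : vs.getD (vs.length - 1 - (vs.length - 1 - i)) 0 = vs[i]'(by omega) := by
        rw [hidx]
        exact List.getD_eq_getElem vs 0 (by omega)
      have h2 : vs.getD (vs.length - 1 - k) 0 = vs[vs.length - 1 - k]'(by omega) :=
        List.getD_eq_getElem vs 0 (by omega)
      rw [h1, h2]
      exact hle

lemma pv_marks_rev (vs : List Int) (col : Int) :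
    ((List.range vs.length).filter (fun k =>
        (((List.range vs.length).map (fun k' => vs.getD (vs.length - 1 - k') 0)).drop (k + 1)).any
          (fun y => vs.getD (vs.length - 1 - k) 0 ≤ y))).map
      (fun k => (((vs.length - 1 - k : Nat) : Int), col))
    = (pvBmarks [] vs col).reverse := by
  rw [pvBmarks]
  simp only [List.nil_append, List.length_nil, Nat.zero_add]
  conv_rhs => rw [← List.map_reverse, ← List.filter_reverse, pv_rev_range, List.filter_map, List.map_map]
  rw [List.filter_congr (fun k hk => ?_)]
  · apply List.map_congr_left
    intro k hk
    simp
  · rw [List.mem_range] at hk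
    simp only [Function.comp_apply]
    exact pv_any_take_drop vs k hk

lemma pv_acol (seats : List (List Int)) (col : Int) (S : List (Int × Int))
    (hS : ∀ p ∈ S, p.2 ≠ col) :
    (PySem.List.enumerate
        ((PySem.List.pyRange ((seats.length : Int) - 1) (-1) (-1)).map
          (fun line => PySem.List.pyGetD (PySem.List.pyGetD seats line []) col 0)) 0).foldl
      (fun sp ih =>
        (PySem.List.enumerate
            (PySem.List.slice
              ((PySem.List.pyRange ((seats.length : Int) - 1) (-1) (-1)).map
                (fun line => PySem.List.pyGetD (PySem.List.pyGetD seats line []) col 0))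
              (some (ih.1 + 1)) none) 0).foldl
          (fun sp jh =>
            if ih.2 ≤ jh.2 then
              if PySem.List.pyGetD
                  ((PySem.List.pyRange ((seats.length : Int) - 1) (-1) (-1)).map
                    (fun line => (line, col))) ih.1 (0, 0) ∈ sp then sp
              else sp ++ [PySem.List.pyGetD
                  ((PySem.List.pyRange ((seats.length : Int) - 1) (-1) (-1)).map
                    (fun line => (line, col))) ih.1 (0, 0)]
            else sp)
          sp)
      S
    = S ++ (pvBmarks [] (pvVcol seats col) col).reverse := by
  have hlen : (pvVcol seats col).length = seats.length := by simp [pvVcol]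
  have h0 : PySem.List.pyGetD ([] : List Int) col 0 = 0 := by
    simp [PySem.List.pyGetD, PySem.List.pyGet?]
  have hL : PySem.List.pyRange ((seats.length : Int) - 1) (-1) (-1)
      = (List.range seats.length).map (fun (k : Nat) => ((seats.length : Int) - 1 - (k : Int))) := by
    rw [PySem.List.pyRange_neg_one]
    have ht : (((seats.length : Int) - 1) - (-1)).toNat = seats.length := by omega
    rw [ht]
  have hval : ∀ k ∈ List.range seats.length,
      PySem.List.pyGetD (PySem.List.pyGetD seats ((seats.length : Int) - 1 - (k : Nat)) []) col 0
      = (pvVcol seats col).getD (seats.length - 1 - k) 0 := by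
    intro k hk
    rw [List.mem_range] at hk
    have hc : ((seats.length : Int) - 1 - (k : Nat)) = ((seats.length - 1 - k : Nat) : Int) := by
      omega
    rw [hc, PySem.List.pyGetD_natCast, pvVcol]
    have hgm := List.getD_map seats [] (n := seats.length - 1 - k)
      (fun row => PySem.List.pyGetD row col 0)
    simp only [h0] at hgm
    exact hgm.symm
  have hhs : (PySem.List.pyRange ((seats.length : Int) - 1) (-1) (-1)).map
        (fun line => PySem.List.pyGetD (PySem.List.pyGetD seats line []) col 0)
      = (List.range seats.length).map
        (fun k => (pvVcol seats col).getD (seats.length - 1 - k) 0) := by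
    rw [hL, List.map_map]
    exact List.map_congr_left hval
  have hps : (PySem.List.pyRange ((seats.length : Int) - 1) (-1) (-1)).map
        (fun line => ((line, col) : Int × Int))
      = (List.range seats.length).map
        (fun k => ((((seats.length - 1 - k : Nat) : Int), col) : Int × Int)) := by
    rw [hL, List.map_map]
    apply List.map_congr_left
    intro k hk
    rw [List.mem_range] at hk
    simp only [Function.comp_apply]
    congr 1
    omega
  rw [hhs, hps]
  have hx : ∀ k ∈ List.range seats.length,
      PySem.List.pyGetD
        ((List.range seats.length).map
          (fun k => ((((seats.length - 1 - k : Nat) : Int), col) : Int × Int))) (k : Nat) (0, 0)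
      = ((((seats.length - 1 - k : Nat) : Int), col) : Int × Int) := by
    intro k hk
    rw [List.mem_range] at hk
    rw [PySem.List.pyGetD_natCast, List.getD_eq_getElem _ _ (by simp [hk]), List.getElem_map,
      List.getElem_range]
  -- collapse the inner loop
  have hstep : (fun (sp : List (Int × Int)) (ih : Int × Int) =>
      (PySem.List.enumerate
          (PySem.List.slice
            ((List.range seats.length).map
              (fun k => (pvVcol seats col).getD (seats.length - 1 - k) 0))
            (some (ih.1 + 1)) none) 0).foldl
        (fun sp jh =>
          if ih.2 ≤ jh.2 then
            if PySem.List.pyGetD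
                ((List.range seats.length).map
                  (fun k => ((((seats.length - 1 - k : Nat) : Int), col) : Int × Int))) ih.1 (0, 0) ∈ sp then sp
            else sp ++ [PySem.List.pyGetD
                ((List.range seats.length).map
                  (fun k => ((((seats.length - 1 - k : Nat) : Int), col) : Int × Int))) ih.1 (0, 0)]
          else sp)
        sp)
    = (fun (sp : List (Int × Int)) (ih : Int × Int) =>
        if (PySem.List.slice
              ((List.range seats.length).map
                (fun k => (pvVcol seats col).getD (seats.length - 1 - k) 0))
              (some (ih.1 + 1)) none).any (fun y => ih.2 ≤ y) ∧
            PySem.List.pyGetD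
              ((List.range seats.length).map
                (fun k => ((((seats.length - 1 - k : Nat) : Int), col) : Int × Int))) ih.1 (0, 0) ∉ sp then
          sp ++ [PySem.List.pyGetD
              ((List.range seats.length).map
                (fun k => ((((seats.length - 1 - k : Nat) : Int), col) : Int × Int))) ih.1 (0, 0)]
        else sp) := by
    funext sp ih
    exact pv_inner _ 0 sp
  rw [hstep]
  -- enumerate of the mapped range
  have henum : PySem.List.enumerate
        ((List.range seats.length).map
          (fun k => (pvVcol seats col).getD (seats.length - 1 - k) 0)) 0
      = (List.range seats.length).map
        (fun k => (((k : Nat) : Int), (pvVcol seats col).getD (seats.length - 1 - k) 0)) := by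
    rw [pv_enum_map, pv_enum_range, List.map_map]
    rfl
  rw [henum, List.foldl_map]
  dsimp only
  have hnd : ((List.range seats.length).map (fun k => PySem.List.pyGetD
      ((List.range seats.length).map
        (fun k => ((((seats.length - 1 - k : Nat) : Int), col) : Int × Int))) ((k : Nat) : Int) (0, 0))).Nodup := by
    rw [List.map_congr_left hx]
    apply List.Nodup.map_on ?_ List.nodup_range
    intro a ha b hb he
    rw [List.mem_range] at ha hb
    rw [Prod.mk.injEq] at he
    omega
  have hSx : ∀ k ∈ List.range seats.length, (PySem.List.pyGetD
      ((List.range seats.length).map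
        (fun k => ((((seats.length - 1 - k : Nat) : Int), col) : Int × Int))) ((k : Nat) : Int) (0, 0)) ∉ S := by
    intro k hk
    rw [hx k hk]
    intro hmem
    exact hS _ hmem rfl
  refine (pv_mark (List.range seats.length)
      (c := fun k => ((PySem.List.slice
          ((List.range seats.length).map
            (fun k' => (pvVcol seats col).getD (seats.length - 1 - k') 0))
          (some (((k : Nat) : Int) + 1)) none).any
        (fun y => (pvVcol seats col).getD (seats.length - 1 - k) 0 ≤ y)))
      (x := fun k => PySem.List.pyGetD
          ((List.range seats.length).map
            (fun k => ((((seats.length - 1 - k : Nat) : Int), col) : Int × Int))) ((k : Nat) : Int) (0, 0))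
      S hnd hSx).trans ?_
  congr 1
  have hfc : ∀ k ∈ List.range seats.length,
      ((PySem.List.slice
          ((List.range seats.length).map
            (fun k' => (pvVcol seats col).getD (seats.length - 1 - k') 0))
          (some (((k : Nat) : Int) + 1)) none).any
        (fun y => (pvVcol seats col).getD (seats.length - 1 - k) 0 ≤ y))
      = (((List.range seats.length).map
            (fun k' => (pvVcol seats col).getD (seats.length - 1 - k') 0)).drop (k + 1)).any
          (fun y => (pvVcol seats col).getD (seats.length - 1 - k) 0 ≤ y) := by
    intro k hk
    have hc1 : (((k : Nat) : Int) + 1) = (((k + 1 : Nat)) : Int) := by omega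
    rw [hc1, PySem.List.slice_from_natCast]
  rw [List.filter_congr hfc]
  rw [List.map_congr_left (fun k hk => hx k (List.mem_of_mem_filter hk))]
  have := pv_marks_rev (pvVcol seats col) col
  rw [hlen] at this
  exact this
lemma pv_blk_snd (vs : List Int) (col : Int) (p : Int × Int)
    (hp : p ∈ (pvBmarks [] vs col).reverse) : p.2 = col := by
  rw [List.mem_reverse, pvBmarks, List.mem_map] at hp
  obtain ⟨j, _, rfl⟩ := hp
  rfl

lemma pv_outer (seats : List (List Int)) (f : List (Int × Int) → Int → List (Int × Int))
    (hf : ∀ S col, (∀ p ∈ S, p.2 ≠ col) → f S col = S ++ (pvBmarks [] (pvVcol seats col) col).reverse)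
    (cols : List Int) (S : List (Int × Int)) (hnd : cols.Nodup)
    (hS : ∀ p ∈ S, p.2 ∉ cols) :
    cols.foldl f S = S ++ cols.flatMap (fun col => (pvBmarks [] (pvVcol seats col) col).reverse) := by
  induction cols generalizing S with
  | nil => simp
  | cons c cs ih =>
    rw [List.nodup_cons] at hnd
    rw [List.foldl_cons, hf S c (fun p hp => hS p hp ∘ (by intro h; rw [h]; exact List.mem_cons_self))]
    rw [ih (S ++ (pvBmarks [] (pvVcol seats c) c).reverse) hnd.2 ?_]
    · rw [List.flatMap_cons, List.append_assoc]
    · intro p hp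
      rcases List.mem_append.1 hp with hp | hp
      · exact fun hm => hS p hp (List.mem_cons_of_mem _ hm)
      · rw [pv_blk_snd _ _ _ hp]
        exact hnd.1

lemma pv_a_eq_canon (seats : List (List Int)) :
    inadequate_seat seats = pvCanon seats := by
  simp only [inadequate_seat]
  have hpair : ∀ col : Int,
      (PySem.List.pyRange ((seats.length : Int) - 1) (-1) (-1)).foldl
        (fun (st : List Int × List (Int × Int)) line =>
          (st.1 ++ [PySem.List.pyGetD (PySem.List.pyGetD seats line []) col 0],
           st.2 ++ [(line, col)]))
        ([], [])
      = ((PySem.List.pyRange ((seats.length : Int) - 1) (-1) (-1)).map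
          (fun line => PySem.List.pyGetD (PySem.List.pyGetD seats line []) col 0),
         (PySem.List.pyRange ((seats.length : Int) - 1) (-1) (-1)).map
          (fun line => (line, col))) := by
    intro col
    rw [PySem.List.foldl_prod_mk
      (f := fun (acc : List Int) (line : Int) =>
        acc ++ [PySem.List.pyGetD (PySem.List.pyGetD seats line []) col 0])
      (g := fun (acc : List (Int × Int)) (line : Int) => acc ++ [(line, col)])]
    rw [PySem.List.foldl_append_singleton_eq_map, PySem.List.foldl_append_singleton_eq_map]
    simp
  simp only [hpair]
  simp only [PySem.List.foldl_append_singleton_eq_map, List.nil_append]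
  rw [List.foldl_map]
  dsimp only
  refine Eq.trans (pv_outer seats _ (fun S col h => pv_acol seats col S h) _ [] ?_ ?_) ?_
  · exact PySem.List.nodup_pyRange_one 0 _
  · simp
  · rw [List.nil_append, pvCanon]

-- ===== VERDICT (by name: the statement is the Claim_ definition above) =====
theorem inadequate_seat_spec : Claim_equal_inadequate_seat := by
  intro seats _ _
  unfold Spec_inadequate_seat
  rw [pv_a_eq_canon, pv_alt_eq_canon]
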